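-- pv_equiv track=rewrite | github.com/howardbyrd/SortingVisualizer | mergeSort.py | getcolorArray
-- ===== SOURCE A (Python) =====
-- def getcolorArray(length, left, middle, right):
--     colorArray = []
--     for i in range(length):
--         if i >= left and i <= right:
--             if i <= middle:
--                 colorArray.append("red") # red
--             else:
--                 colorArray.append("green") # green
--         else:
--             colorArray.append("blue") # blue
--
--     return colorArray
-- ===== SOURCE B (Python) =====
-- def getcolorArray(length, left, middle, right):
--     colorArray = ["blue"] * length
--     lo = max(left, 0)
--     hi = min(middle, right, length - 1)
--     if lo <= hi:
--         colorArray[lo:hi + 1] = ["red"] * (hi - lo + 1)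
--     glo = max(left, middle + 1, 0)
--     ghi = min(right, length - 1)
--     if glo <= ghi:
--         colorArray[glo:ghi + 1] = ["green"] * (ghi - glo + 1)
--     return colorArray
-- ===== Notes on version B (the rewrite author's own statement) =====
-- stated objective: simpler
-- what changed: Replaced the per-index branching loop over range(length) by three clamped bulk segment fills: a blue base array, then one red slice assignment for [left, min(middle,right)] and one green slice assignment for [max(left,middle+1), right].
import Mathlib
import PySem

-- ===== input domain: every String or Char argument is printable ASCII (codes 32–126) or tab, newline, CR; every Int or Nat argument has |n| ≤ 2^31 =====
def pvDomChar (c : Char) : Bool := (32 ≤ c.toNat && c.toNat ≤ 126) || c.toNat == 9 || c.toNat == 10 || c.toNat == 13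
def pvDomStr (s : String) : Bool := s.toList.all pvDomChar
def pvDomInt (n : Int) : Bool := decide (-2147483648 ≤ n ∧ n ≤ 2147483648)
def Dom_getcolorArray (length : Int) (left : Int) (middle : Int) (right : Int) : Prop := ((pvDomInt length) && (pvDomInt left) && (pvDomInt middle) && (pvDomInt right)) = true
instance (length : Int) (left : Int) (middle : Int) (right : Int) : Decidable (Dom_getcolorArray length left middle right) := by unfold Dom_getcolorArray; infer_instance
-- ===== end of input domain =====

-- B replaces the per-index branching loop by three clamped bulk segment fills (objective: simpler decomposition).


-- ===== PORT A =====
-- 'for i in range(length): if … append' as a foldl over pyRange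
def getcolorArray (length : Int) (left : Int) (middle : Int) (right : Int) : List String :=
  (PySem.List.pyRange 0 length 1).foldl
    (fun colorArray i =>
      if left ≤ i ∧ i ≤ right then
        if i ≤ middle then colorArray ++ ["red"] else colorArray ++ ["green"]
      else colorArray ++ ["blue"]) []

-- ===== PORT B =====
-- slice assignment with an equal-length segment, ported as take/replicate/drop;
-- exact here since under the guard 0 ≤ lo ≤ hi + 1 ≤ length of the list
def pvSetSeg (xs : List String) (lo hi : Int) (c : String) : List String :=
  if lo ≤ hi then
    xs.take lo.toNat ++ List.replicate (hi - lo + 1).toNat c ++ xs.drop (hi + 1).toNat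
  else xs

def getcolorArray_alt (length : Int) (left : Int) (middle : Int) (right : Int) : List String :=
  let blue := List.replicate length.toNat "blue"   -- ["blue"] * length
  let lo := max left 0
  let hi := min middle (min right (length - 1))
  let c1 := pvSetSeg blue lo hi "red"
  let glo := max (max left (middle + 1)) 0
  let ghi := min right (length - 1)
  pvSetSeg c1 glo ghi "green"

-- ===== PRECONDITION & SPEC =====
def Spec_getcolorArray (length : Int) (left : Int) (middle : Int) (right : Int) (out : List String) : Prop := out = getcolorArray_alt length left middle right
instance (length : Int) (left : Int) (middle : Int) (right : Int) (out : List String) : Decidable (Spec_getcolorArray length left middle right out) := by unfold Spec_getcolorArray; infer_instance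

-- ===== CLAIM (what is proved, stated in full; the proofs are below) =====
def Claim_equal_getcolorArray : Prop := ∀ (length : Int) (left : Int) (middle : Int) (right : Int), Dom_getcolorArray length left middle right → Spec_getcolorArray length left middle right (getcolorArray length left middle right)

-- ===== LEMMAS AND PROOFS =====

-- the per-index color both programs realise
def pvColor (left middle right i : Int) : String :=
  if left ≤ i ∧ i ≤ right then (if i ≤ middle then "red" else "green") else "blue"

lemma A_eq_map (length left middle right : Int) :
    getcolorArray length left middle right
      = (List.range length.toNat).map (fun (k : Nat) => pvColor left middle right (k : Int)) := by
  unfold getcolorArray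
  rw [PySem.List.pyRange_one]
  have h : ∀ (acc : List String) (i : Int),
      (if left ≤ i ∧ i ≤ right then
        if i ≤ middle then acc ++ ["red"] else acc ++ ["green"]
       else acc ++ ["blue"]) = acc ++ [pvColor left middle right i] := by
    intro acc i; unfold pvColor; split_ifs <;> rfl
  simp only [List.foldl_map, h]
  rw [PySem.List.foldl_append_singleton_eq_map]
  simp only [List.nil_append, zero_add, sub_zero]

lemma setSeg_eq_map (n : Nat) (f : Nat → String) (lo hi : Int) (c : String)
    (h0 : 0 ≤ lo) (hn : hi < (n : Int)) :
    pvSetSeg ((List.range n).map f) lo hi c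
      = (List.range n).map (fun (k : Nat) => if lo ≤ (k : Int) ∧ (k : Int) ≤ hi then c else f k) := by
  unfold pvSetSeg
  split_ifs with hle
  · apply List.ext_getElem
    · simp; omega
    · intro k hk1 hk2
      simp only [List.length_map, List.length_range] at hk2
      simp only [List.getElem_map, List.getElem_range]
      have hl1 : (List.take lo.toNat ((List.range n).map f)).length = lo.toNat := by
        simp; omega
      have hl2 : (List.replicate (hi - lo + 1).toNat c).length = (hi - lo + 1).toNat := by simp
      by_cases h1 : k < lo.toNat
      · rw [List.getElem_append_left (by rw [List.length_append, hl1, hl2]; omega),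
            List.getElem_append_left (by rw [hl1]; omega),
            List.getElem_take, List.getElem_map, List.getElem_range]
        rw [if_neg]; omega
      · by_cases h2 : k < (hi + 1).toNat
        · rw [List.getElem_append_left (by rw [List.length_append, hl1, hl2]; omega),
              List.getElem_append_right (by rw [hl1]; omega),
              List.getElem_replicate]
          rw [if_pos]; omega
        · rw [List.getElem_append_right (by rw [List.length_append, hl1, hl2]; omega),
              List.getElem_drop, List.getElem_map, List.getElem_range]
          rw [if_neg (by omega)]
          congr 1
          rw [List.length_append, hl1, hl2]; omega
  · apply List.map_congr_left
    intro k hk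
    rw [if_neg]
    omega

lemma B_eq_map (length left middle right : Int) :
    getcolorArray_alt length left middle right
      = (List.range length.toNat).map (fun (k : Nat) => pvColor left middle right (k : Int)) := by
  dsimp only [getcolorArray_alt]
  have hblue : List.replicate length.toNat "blue"
      = (List.range length.toNat).map (fun _ => "blue") := by
    simp [List.map_const']
  rw [hblue]
  have h0a : (0:Int) ≤ max left 0 := by omega
  have hna : min middle (min right (length - 1)) < (length.toNat : Int) := by omega
  have h0b : (0:Int) ≤ max (max left (middle + 1)) 0 := by omega
  have hnb : min right (length - 1) < (length.toNat : Int) := by omega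
  rw [setSeg_eq_map _ _ _ _ _ h0a hna]
  rw [setSeg_eq_map _ _ _ _ _ h0b hnb]
  apply List.map_congr_left
  intro k hk
  simp only [List.mem_range] at hk
  unfold pvColor
  have hk' : (k : Int) < length := by omega
  simp only [max_def, min_def]
  split_ifs <;> first | rfl | omega

-- ===== VERDICT (by name: the statement is the Claim_ definition above) =====
theorem getcolorArray_spec : Claim_equal_getcolorArray := by
  intro length left middle right _
  unfold Spec_getcolorArray
  rw [A_eq_map, B_eq_map]
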